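-- pv_equiv track=rewrite | github.com/asfjwd/CSE2203 | main.py | ami
-- ===== SOURCE A (Python) =====
-- def ami(dat):
--   x = [i for i in range(len(dat) + 1)]
--   y = [0]
--   nxt = 1
--   for d in dat:
--     if d == 1:
--       y.append(nxt)
--       nxt = nxt * -1;
--     else:
--       y.append(0)
--   return x, y
-- ===== SOURCE B (Python) =====
-- def ami(dat):
--   ones = [i for i, d in enumerate(dat) if d == 1]
--   x = list(range(len(dat) + 1))
--   y = [0] * (len(dat) + 1)
--   for j, idx in enumerate(ones):
--     y[idx + 1] = 1 if j % 2 == 0 else -1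
--   return x, y
-- ===== Notes on version B (the rewrite author's own statement) =====
-- stated objective: alternative
-- what changed: Instead of one scan that appends to y while toggling a sign accumulator, B first collects the indices of the 1-entries, preallocates y as zeros of length n+1, and scatters alternating signs (by rank parity of each 1-position) into it.
import Mathlib
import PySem

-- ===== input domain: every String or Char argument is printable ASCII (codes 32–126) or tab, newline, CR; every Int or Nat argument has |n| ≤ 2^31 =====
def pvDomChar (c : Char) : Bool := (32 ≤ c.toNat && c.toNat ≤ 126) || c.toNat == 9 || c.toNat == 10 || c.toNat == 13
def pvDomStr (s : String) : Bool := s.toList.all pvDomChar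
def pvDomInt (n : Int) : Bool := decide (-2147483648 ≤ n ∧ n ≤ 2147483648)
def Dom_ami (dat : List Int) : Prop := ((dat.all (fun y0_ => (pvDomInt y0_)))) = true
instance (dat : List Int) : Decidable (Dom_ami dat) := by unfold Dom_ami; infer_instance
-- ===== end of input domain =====

-- B replaces A's single appending scan with a toggling accumulator by an index-collect
-- plus a scatter of rank-parity signs into a preallocated zero array (alternative decomposition).

-- ===== PORT A =====
def amiStep (s : List Int × Int) (d : Int) : List Int × Int :=
  if d = 1 then (s.1 ++ [s.2], s.2 * (-1)) else (s.1 ++ [(0 : Int)], s.2)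

def ami (dat : List Int) : List Int × List Int :=
  let x := PySem.List.pyRange 0 (dat.length + 1) 1
  let s := dat.foldl amiStep ([0], 1)
  (x, s.1)

-- ===== PORT B =====
def altOnes (dat : List Int) : List Int :=
  ((PySem.List.enumerate dat 0).filter (fun p => p.2 == 1)).map Prod.fst

-- y[idx + 1] = …: the index idx+1 is always in range (0 ≤ idx < len dat), so pySetD is exact here
def altScatter (ps : List (Int × Int)) (y : List Int) : List Int :=
  ps.foldl (fun y p =>
    PySem.List.pySetD y (p.2 + 1) (if PySem.Int.mod p.1 2 = 0 then (1 : Int) else -1)) y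

def ami_alt (dat : List Int) : List Int × List Int :=
  let ones := altOnes dat
  let x := PySem.List.pyRange 0 (dat.length + 1) 1
  let y0 : List Int := List.replicate (dat.length + 1) 0
  let y := altScatter (PySem.List.enumerate ones 0) y0
  (x, y)

-- ===== PRECONDITION & SPEC =====
def Spec_ami (dat : List Int) (out : List Int × List Int) : Prop := out = ami_alt dat
instance (dat : List Int) (out : List Int × List Int) : Decidable (Spec_ami dat out) := by unfold Spec_ami; infer_instance

-- ===== CLAIM (what is proved, stated in full; the proofs are below) =====
def Claim_equal_ami : Prop := ∀ (dat : List Int), Dom_ami dat → Spec_ami dat (ami dat)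

-- ===== LEMMAS AND PROOFS =====

lemma altOnes_mem {dat : List Int} {i : Int} (h : i ∈ altOnes dat) :
    0 ≤ i ∧ i < dat.length := by
  unfold altOnes at h
  simp only [List.mem_map, List.mem_filter] at h
  obtain ⟨p, ⟨hp, _⟩, rfl⟩ := h
  rw [PySem.List.mem_enumerate_iff] at hp
  obtain ⟨k, hk, rfl⟩ := hp
  refine ⟨by simp, ?_⟩
  simp only [Prod.fst]
  omega

lemma altOnes_append (dat : List Int) (d : Int) :
    altOnes (dat ++ [d]) =
      altOnes dat ++ (if d = 1 then [(dat.length : Int)] else []) := by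
  unfold altOnes
  rw [PySem.List.enumerate_append, List.filter_append, List.map_append]
  congr 1
  by_cases hd : d = 1 <;>
    simp [PySem.List.enumerate, hd]

lemma altScatter_append_last (ps : List (Int × Int)) (y : List Int) (a : Int)
    (h : ∀ p ∈ ps, 0 ≤ p.2 ∧ p.2 + 1 < y.length) :
    altScatter ps (y ++ [a]) = altScatter ps y ++ [a] := by
  induction ps generalizing y with
  | nil => rfl
  | cons p ps ih =>
    have hp := h p (by simp)
    unfold altScatter
    simp only [List.foldl_cons]
    have hset : PySem.List.pySetD (y ++ [a]) (p.2 + 1)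
        (if PySem.Int.mod p.1 2 = 0 then (1 : Int) else -1) =
        PySem.List.pySetD y (p.2 + 1)
        (if PySem.Int.mod p.1 2 = 0 then (1 : Int) else -1) ++ [a] := by
      rw [PySem.List.pySetD_of_nonneg _ _ (by omega), PySem.List.pySetD_of_nonneg _ _ (by omega)]
      rw [List.set_append]
      have : (p.2 + 1).toNat < y.length := by omega
      simp [this]
    rw [hset]
    exact ih _ (fun q hq => by
      have := h q (by simp [hq])
      simpa [PySem.List.length_pySetD] using this)

lemma length_altScatter (ps : List (Int × Int)) (y : List Int) :
    (altScatter ps y).length = y.length := by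
  induction ps generalizing y with
  | nil => rfl
  | cons p ps ih =>
    unfold altScatter
    simp only [List.foldl_cons]
    rw [show (List.foldl _ _ ps = altScatter ps _) from rfl, ih,
      PySem.List.length_pySetD]

lemma altScatter_split (ps qs : List (Int × Int)) (y : List Int) :
    altScatter (ps ++ qs) y = altScatter qs (altScatter ps y) := by
  unfold altScatter
  exact List.foldl_append

lemma altScatter_single (p : Int × Int) (y : List Int) :
    altScatter [p] y =
      PySem.List.pySetD y (p.2 + 1) (if PySem.Int.mod p.1 2 = 0 then (1 : Int) else -1) := rfl

lemma amiStep_one (s : List Int × Int) : amiStep s 1 = (s.1 ++ [s.2], s.2 * -1) := by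
  simp [amiStep]

lemma amiStep_ne (s : List Int × Int) {d : Int} (h : d ≠ 1) :
    amiStep s d = (s.1 ++ [0], s.2) := by
  simp [amiStep, h]

lemma ami_main (dat : List Int) :
    (dat.foldl amiStep ([0], 1)).1 =
      altScatter (PySem.List.enumerate (altOnes dat) 0)
        (List.replicate (dat.length + 1) 0) ∧
    (dat.foldl amiStep ([0], 1)).2 =
      (if (altOnes dat).length % 2 = 0 then (1 : Int) else -1) := by
  induction dat using List.reverseRecOn with
  | nil => simp [altOnes, altScatter, PySem.List.enumerate]
  | append_singleton dat d ih =>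
    obtain ⟨ih1, ih2⟩ := ih
    rw [List.foldl_append, List.foldl_cons, List.foldl_nil]
    have hlen : (List.replicate (dat.length + 1 + 1) (0 : Int)) =
        List.replicate (dat.length + 1) (0 : Int) ++ [0] := by
      rw [← List.replicate_succ']
    have hbound : ∀ p ∈ PySem.List.enumerate (altOnes dat) 0,
        0 ≤ p.2 ∧ p.2 + 1 < ((List.replicate (dat.length + 1) (0 : Int)).length : Int) := by
      intro p hp
      have hp2 : p.2 ∈ altOnes dat := by
        have := PySem.List.map_snd_enumerate (altOnes dat) 0
        exact this ▸ List.mem_map_of_mem hp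
      have := altOnes_mem hp2
      simp only [List.length_replicate]
      push_cast
      omega
    by_cases hd : d = 1
    · subst hd
      have hones := altOnes_append dat 1
      rw [if_pos rfl] at hones
      rw [amiStep_one]
      constructor
      · show _ ++ _ = _
        rw [hones, PySem.List.enumerate_append]
        simp only [List.length_append, List.length_cons,
          List.length_nil]
        rw [hlen]
        rw [altScatter_split, altScatter_append_last _ _ _ hbound]
        rw [show PySem.List.enumerate [(dat.length : Int)] (0 + (altOnes dat).length) =
          [((0 : Int) + (altOnes dat).length, (dat.length : Int))] from rfl]
        rw [altScatter_single, PySem.List.pySetD_of_nonneg _ _ (by positivity)]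
        have hL : ((altScatter (PySem.List.enumerate (altOnes dat) 0)
            (List.replicate (dat.length + 1) 0))).length = dat.length + 1 := by
          rw [length_altScatter]; simp
        rw [List.set_append]
        have hnat : ((dat.length : Int) + 1).toNat = dat.length + 1 := by omega
        rw [hnat, hL, if_neg (by omega)]
        simp only [Nat.sub_self, List.set_cons_zero]
        rw [ih1, ih2]
        have hiff : PySem.Int.mod (0 + ((altOnes dat).length : Int)) 2 = 0 ↔
            (altOnes dat).length % 2 = 0 := by
          rw [zero_add,
            show ((2:Int) = ((2:Nat):Int)) from rfl, PySem.Int.mod_natCast]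
          omega
        by_cases hpar : (altOnes dat).length % 2 = 0
        · rw [if_pos hpar, if_pos (hiff.mpr hpar)]
        · rw [if_neg hpar, if_neg (fun h => hpar (hiff.mp h))]
      · show _ * (-1) = _
        rw [ih2, hones, List.length_append, List.length_singleton]
        by_cases hpar : (altOnes dat).length % 2 = 0
        · rw [if_pos hpar, if_neg (by omega)]; norm_num
        · rw [if_neg hpar, if_pos (by omega)]; norm_num
    · have hones := altOnes_append dat d
      rw [if_neg hd, List.append_nil] at hones
      rw [amiStep_ne _ hd]
      constructor
      · show _ ++ _ = _
        rw [hones]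
        simp only [List.length_append, List.length_singleton]
        rw [hlen, altScatter_append_last _ _ _ hbound, ih1]
      · show _ = _
        rw [hones]
        exact ih2

-- ===== VERDICT (by name: the statement is the Claim_ definition above) =====
theorem ami_spec : Claim_equal_ami := by
  intro dat _
  unfold Spec_ami ami ami_alt
  simp only
  rw [(ami_main dat).1]
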